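-- pv_equiv track=rewrite | github.com/kirill3754/LeetCode-kirill3754 | 2679-count-distinct-numbers-on-board/2679-count-distinct-numbers-on-board.py | distinctIntegers
-- ===== SOURCE A (Python) =====
-- def distinctIntegers(n: int) -> int:
--     all_numbers = {n}
--     added_numbers = all_numbers.copy()
--     while added_numbers:
--         new_numbers = set()
--         for x in added_numbers:
--             for i in range(1, min(n, x)):
--                 if i not in all_numbers and x%i==1:
--                     new_numbers.add(i)
--                     all_numbers.add(i)
--         added_numbers = new_numbers.copy()
--     return len(all_numbers)
-- ===== SOURCE B (Python) =====
-- def distinctIntegers(n: int) -> int: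
--     # Closed form: the rule x % i == 1 generates exactly {2, ..., n} from n (and nothing for n <= 2),
--     # so the count of distinct numbers on the board is max(1, n - 1).
--     return max(1, n - 1)
-- ===== Notes on version B (the rewrite author's own statement) =====
-- stated objective: faster
-- what changed: Replaces the fixpoint set-expansion loop (repeatedly scanning range(1, min(n,x)) for every newly added x) by the closed form max(1, n-1).
import Mathlib
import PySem

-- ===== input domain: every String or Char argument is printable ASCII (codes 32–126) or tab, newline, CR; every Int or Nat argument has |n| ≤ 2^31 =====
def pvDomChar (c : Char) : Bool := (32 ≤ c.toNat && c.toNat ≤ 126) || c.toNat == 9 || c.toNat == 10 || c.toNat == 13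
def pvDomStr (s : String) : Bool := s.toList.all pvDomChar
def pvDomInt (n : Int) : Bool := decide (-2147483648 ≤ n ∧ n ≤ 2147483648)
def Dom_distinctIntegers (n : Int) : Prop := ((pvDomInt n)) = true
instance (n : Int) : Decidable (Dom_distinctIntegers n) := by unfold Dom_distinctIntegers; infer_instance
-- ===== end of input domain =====

-- B replaces A's fixpoint set-expansion loop by the closed form max(1, n-1); objective: faster (asymptotic, as measured).

-- ===== PORT A =====
-- body of the inner loop: 'for i in range(1, min(n, x)): if i not in all_numbers and x%i==1: …'
-- state st = (all_numbers, new_numbers)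
def pvStep (x : Int) (st : PySem.Set Int × PySem.Set Int) (i : Int) : PySem.Set Int × PySem.Set Int :=
  if i ∉ st.1 ∧ PySem.Int.mod x i = 1 then (PySem.Set.add st.1 i, PySem.Set.add st.2 i) else st

-- one pass of the while-loop body: 'for x in added_numbers: …' starting from new_numbers = set()
def pvBody (n : Int) (all added : PySem.Set Int) : PySem.Set Int × PySem.Set Int :=
  added.foldl (fun st x => (PySem.List.pyRange 1 (min n x) 1).foldl (pvStep x) st)
    (all, PySem.Set.empty)

-- 'while added_numbers: …' with fuel; fuel n.toNat + 2 is proved sufficient below (the loop only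
-- ever adds elements of [2, n-1], so it stabilises after at most n-1 productive passes).
def pvLoop (n : Int) : Nat → PySem.Set Int → PySem.Set Int → PySem.Set Int
  | 0, all, _ => all
  | fuel + 1, all, added =>
    if added.isEmpty then all
    else
      let st := pvBody n all added
      pvLoop n fuel st.1 st.2

def distinctIntegers (n : Int) : Int :=
  let allNumbers : PySem.Set Int := PySem.Set.ofList [n]
  let addedNumbers : PySem.Set Int := allNumbers
  PySem.Set.len (pvLoop n (n.toNat + 2) allNumbers addedNumbers)

-- ===== PORT B =====
def distinctIntegers_alt (n : Int) : Int := max 1 (n - 1)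

-- ===== PRECONDITION & SPEC =====
def Spec_distinctIntegers (n : Int) (out : Int) : Prop := out = distinctIntegers_alt n
instance (n : Int) (out : Int) : Decidable (Spec_distinctIntegers n out) := by unfold Spec_distinctIntegers; infer_instance

-- ===== CLAIM (what is proved, stated in full; the proofs are below) =====
def Claim_equal_distinctIntegers : Prop := ∀ (n : Int), Dom_distinctIntegers n → Spec_distinctIntegers n (distinctIntegers n)

-- ===== LEMMAS AND PROOFS =====

-- unfolding equations for the fueled loop
theorem pvLoop_succ (n : Int) (fuel : Nat) (all added : PySem.Set Int) :
    pvLoop n (fuel + 1) all added =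
      if added.isEmpty then all
      else pvLoop n fuel (pvBody n all added).1 (pvBody n all added).2 := rfl

-- ---- generic lemmas about folds over a pair-of-sets state ----

theorem pvFoldMono1 {ι : Type} (f : (List Int × List Int) → ι → (List Int × List Int))
    (hm : ∀ st i a, a ∈ st.1 → a ∈ (f st i).1) (l : List ι) (st : List Int × List Int)
    (a : Int) (h : a ∈ st.1) : a ∈ (l.foldl f st).1 := by
  induction l generalizing st with
  | nil => exact h
  | cons i l ih => exact ih _ (hm st i a h)

theorem pvFoldMono2 {ι : Type} (f : (List Int × List Int) → ι → (List Int × List Int))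
    (hm : ∀ st i a, a ∈ st.2 → a ∈ (f st i).2) (l : List ι) (st : List Int × List Int)
    (a : Int) (h : a ∈ st.2) : a ∈ (l.foldl f st).2 := by
  induction l generalizing st with
  | nil => exact h
  | cons i l ih => exact ih _ (hm st i a h)

theorem pvFoldNewSub {ι : Type} (f : (List Int × List Int) → ι → (List Int × List Int))
    (hm2 : ∀ st i a, a ∈ st.2 → a ∈ (f st i).2)
    (hns : ∀ st i a, a ∈ (f st i).1 → a ∈ st.1 ∨ a ∈ (f st i).2)
    (l : List ι) (st : List Int × List Int) (a : Int)
    (h : a ∈ (l.foldl f st).1) : a ∈ st.1 ∨ a ∈ (l.foldl f st).2 := by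
  induction l generalizing st with
  | nil => exact Or.inl h
  | cons i l ih =>
    simp only [List.foldl_cons] at h ⊢
    rcases ih (f st i) h with h' | h'
    · rcases hns st i a h' with h'' | h''
      · exact Or.inl h''
      · exact Or.inr (pvFoldMono2 f hm2 l _ a h'')
    · exact Or.inr h'

theorem pvFoldNodup {ι : Type} (f : (List Int × List Int) → ι → (List Int × List Int))
    (hn : ∀ st i, st.1.Nodup → (f st i).1.Nodup) (l : List ι) (st : List Int × List Int)
    (h : st.1.Nodup) : (l.foldl f st).1.Nodup := by
  induction l generalizing st with
  | nil => exact h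
  | cons i l ih => exact ih _ (hn st i h)

theorem pvFoldSub21 {ι : Type} (f : (List Int × List Int) → ι → (List Int × List Int))
    (hs : ∀ st i, (∀ a ∈ st.2, a ∈ st.1) → ∀ a ∈ (f st i).2, a ∈ (f st i).1)
    (l : List ι) (st : List Int × List Int) (h : ∀ a ∈ st.2, a ∈ st.1) :
    ∀ a ∈ (l.foldl f st).2, a ∈ (l.foldl f st).1 := by
  induction l generalizing st with
  | nil => exact h
  | cons i l ih => exact ih _ (hs st i h)

theorem pvFoldNewDisj {ι : Type} (f : (List Int × List Int) → ι → (List Int × List Int))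
    (hm1 : ∀ st i a, a ∈ st.1 → a ∈ (f st i).1)
    (hd : ∀ st i a, a ∈ (f st i).2 → a ∈ st.2 ∨ a ∉ st.1)
    (l : List ι) (st : List Int × List Int) (a : Int)
    (h : a ∈ (l.foldl f st).2) : a ∈ st.2 ∨ a ∉ st.1 := by
  induction l generalizing st with
  | nil => exact Or.inl h
  | cons i l ih =>
    rcases ih (f st i) h with h' | h'
    · exact hd st i a h'
    · exact Or.inr fun hin => h' (hm1 st i a hin)

theorem pvFoldElems {ι : Type} (f : (List Int × List Int) → ι → (List Int × List Int))
    (P : ι → Int → Prop) (he : ∀ st i a, a ∈ (f st i).1 → a ∈ st.1 ∨ P i a)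
    (l : List ι) (st : List Int × List Int) (a : Int)
    (h : a ∈ (l.foldl f st).1) : a ∈ st.1 ∨ ∃ i ∈ l, P i a := by
  induction l generalizing st with
  | nil => exact Or.inl h
  | cons i l ih =>
    rcases ih (f st i) h with h' | h'
    · rcases he st i a h' with h'' | h''
      · exact Or.inl h''
      · exact Or.inr ⟨i, by simp, h''⟩
    · rcases h' with ⟨j, hj, hp⟩
      exact Or.inr ⟨j, List.mem_cons_of_mem _ hj, hp⟩

theorem pvFoldHit {ι : Type} (f : (List Int × List Int) → ι → (List Int × List Int))
    (hm1 : ∀ st i a, a ∈ st.1 → a ∈ (f st i).1) (a : Int) (l : List ι)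
    (st : List Int × List Int) (x : ι) (hx : x ∈ l) (hp : ∀ st, a ∈ (f st x).1) :
    a ∈ (l.foldl f st).1 := by
  induction l generalizing st with
  | nil => simp at hx
  | cons y l ih =>
    rcases List.mem_cons.1 hx with h | h
    · subst h
      exact pvFoldMono1 f hm1 l _ a (hp st)
    · exact ih _ h

-- ---- properties of the single inner step pvStep ----

theorem pvStep_mono1 (x : Int) (st : List Int × List Int) (i a : Int) (h : a ∈ st.1) :
    a ∈ (pvStep x st i).1 := by
  unfold pvStep; split
  · exact (PySem.Set.mem_add _ _ _).2 (Or.inl h)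
  · exact h

theorem pvStep_mono2 (x : Int) (st : List Int × List Int) (i a : Int) (h : a ∈ st.2) :
    a ∈ (pvStep x st i).2 := by
  unfold pvStep; split
  · exact (PySem.Set.mem_add _ _ _).2 (Or.inl h)
  · exact h

theorem pvStep_newsub (x : Int) (st : List Int × List Int) (i a : Int)
    (h : a ∈ (pvStep x st i).1) : a ∈ st.1 ∨ a ∈ (pvStep x st i).2 := by
  unfold pvStep at h ⊢
  split at h
  · rcases (PySem.Set.mem_add _ _ _).1 h with h' | h'
    · exact Or.inl h'
    · subst h'
      simp_all [PySem.Set.mem_add]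
  · exact Or.inl h

theorem pvStep_nodup (x : Int) (st : List Int × List Int) (i : Int) (h : st.1.Nodup) :
    (pvStep x st i).1.Nodup := by
  unfold pvStep; split
  · exact PySem.Set.nodup_add st.1 i h
  · exact h

theorem pvStep_sub21 (x : Int) (st : List Int × List Int) (i : Int)
    (h : ∀ a ∈ st.2, a ∈ st.1) : ∀ a ∈ (pvStep x st i).2, a ∈ (pvStep x st i).1 := by
  unfold pvStep; split
  · intro a ha
    rcases (PySem.Set.mem_add _ _ _).1 ha with h' | h'
    · exact (PySem.Set.mem_add _ _ _).2 (Or.inl (h a h'))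
    · exact (PySem.Set.mem_add _ _ _).2 (Or.inr h')
  · exact h

theorem pvStep_newdisj (x : Int) (st : List Int × List Int) (i a : Int)
    (h : a ∈ (pvStep x st i).2) : a ∈ st.2 ∨ a ∉ st.1 := by
  unfold pvStep at h
  split at h
  · rename_i hc
    rcases (PySem.Set.mem_add _ _ _).1 h with h' | h'
    · exact Or.inl h'
    · exact Or.inr (h' ▸ hc.1)
  · exact Or.inl h

theorem pvStep_elems (x : Int) (st : List Int × List Int) (i a : Int)
    (h : a ∈ (pvStep x st i).1) : a ∈ st.1 ∨ (a = i ∧ PySem.Int.mod x i = 1) := by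
  unfold pvStep at h
  split at h
  · rename_i hc
    rcases (PySem.Set.mem_add _ _ _).1 h with h' | h'
    · exact Or.inl h'
    · exact Or.inr ⟨h', hc.2⟩
  · exact Or.inl h

theorem pvStep_hit (x : Int) (st : List Int × List Int) (i : Int)
    (hm : PySem.Int.mod x i = 1) : i ∈ (pvStep x st i).1 := by
  unfold pvStep
  split
  · exact (PySem.Set.mem_add _ _ _).2 (Or.inr rfl)
  · rename_i hc
    by_cases hin : i ∈ st.1
    · exact hin
    · exact absurd ⟨hin, hm⟩ hc

-- the whole body of the outer 'for x in added_numbers' loop, as a step function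
def pvOuterStep (n : Int) (st : PySem.Set Int × PySem.Set Int) (x : Int) :
    PySem.Set Int × PySem.Set Int :=
  (PySem.List.pyRange 1 (min n x) 1).foldl (pvStep x) st

theorem pvBody_eq (n : Int) (all added : PySem.Set Int) :
    pvBody n all added = added.foldl (pvOuterStep n) (all, PySem.Set.empty) := rfl

-- ---- properties of pvOuterStep, lifted from pvStep ----

theorem pvOuterStep_mono1 (n : Int) (st : List Int × List Int) (x a : Int) (h : a ∈ st.1) :
    a ∈ (pvOuterStep n st x).1 :=
  pvFoldMono1 (pvStep x) (pvStep_mono1 x) _ st a h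

theorem pvOuterStep_mono2 (n : Int) (st : List Int × List Int) (x a : Int) (h : a ∈ st.2) :
    a ∈ (pvOuterStep n st x).2 :=
  pvFoldMono2 (pvStep x) (pvStep_mono2 x) _ st a h

theorem pvOuterStep_newsub (n : Int) (st : List Int × List Int) (x a : Int)
    (h : a ∈ (pvOuterStep n st x).1) : a ∈ st.1 ∨ a ∈ (pvOuterStep n st x).2 :=
  pvFoldNewSub (pvStep x) (pvStep_mono2 x) (pvStep_newsub x) _ st a h

theorem pvOuterStep_nodup (n : Int) (st : List Int × List Int) (x : Int) (h : st.1.Nodup) :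
    (pvOuterStep n st x).1.Nodup :=
  pvFoldNodup (pvStep x) (pvStep_nodup x) _ st h

theorem pvOuterStep_sub21 (n : Int) (st : List Int × List Int) (x : Int)
    (h : ∀ a ∈ st.2, a ∈ st.1) : ∀ a ∈ (pvOuterStep n st x).2, a ∈ (pvOuterStep n st x).1 :=
  pvFoldSub21 (pvStep x) (pvStep_sub21 x) _ st h

theorem pvOuterStep_newdisj (n : Int) (st : List Int × List Int) (x a : Int)
    (h : a ∈ (pvOuterStep n st x).2) : a ∈ st.2 ∨ a ∉ st.1 :=
  pvFoldNewDisj (pvStep x) (pvStep_mono1 x) (pvStep_newdisj x) _ st a h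

theorem pvOuterStep_elems (n : Int) (st : List Int × List Int) (x a : Int)
    (h : a ∈ (pvOuterStep n st x).1) :
    a ∈ st.1 ∨ (a ∈ PySem.List.pyRange 1 (min n x) 1 ∧ PySem.Int.mod x a = 1) := by
  rcases pvFoldElems (pvStep x) (fun i a => a = i ∧ PySem.Int.mod x i = 1)
      (pvStep_elems x) _ st a h with h' | ⟨i, hi, rfl, hm⟩
  · exact Or.inl h'
  · exact Or.inr ⟨hi, hm⟩

theorem pvOuterStep_hit (n : Int) (st : List Int × List Int) (x i : Int)
    (hi : i ∈ PySem.List.pyRange 1 (min n x) 1) (hm : PySem.Int.mod x i = 1) :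
    i ∈ (pvOuterStep n st x).1 :=
  pvFoldHit (pvStep x) (pvStep_mono1 x) i _ st i hi (fun st' => pvStep_hit x st' i hm)

-- ---- arithmetic helpers ----

theorem pv_mod_one (x : Int) : PySem.Int.mod x 1 = 0 := by
  have h1 := PySem.Int.mod_nonneg x (b := 1) (by omega)
  have h2 := PySem.Int.mod_lt x (b := 1) (by omega)
  omega

theorem pv_mod_succ (k : Int) (h : 2 ≤ k) : PySem.Int.mod (k + 1) k = 1 := by
  rw [PySem.Int.mod_eq_emod_of_pos (h := by omega)]
  have h1 : ((1:Int) + k * 1) % k = 1 % k := Int.add_mul_emod_self_left 1 k 1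
  have h2 : (1:Int) % k = 1 := Int.emod_eq_of_lt (by omega) (by omega)
  have h3 : ((1:Int) + k * 1) = k + 1 := by ring
  rw [← h3, h1, h2]

-- ---- the loop invariant ----

def pvInv (n : Int) (all added : List Int) : Prop :=
  all.Nodup ∧ n ∈ all ∧ (∀ a ∈ all, a = n ∨ (2 ≤ a ∧ a ≤ n - 1)) ∧
  (∀ a ∈ added, a ∈ all) ∧
  (∀ k : Int, 2 ≤ k → k ≤ n - 1 → k + 1 ∈ all → k + 1 ∉ added → k ∈ all)

-- elements of pvBody's all-set are in the old all-set or in [2, n-1]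
theorem pvBody_elems (n : Int) (all added : List Int) (a : Int)
    (h : a ∈ (pvBody n all added).1) : a ∈ all ∨ (2 ≤ a ∧ a ≤ n - 1) := by
  rw [pvBody_eq] at h
  rcases pvFoldElems (pvOuterStep n)
      (fun x a => a ∈ PySem.List.pyRange 1 (min n x) 1 ∧ PySem.Int.mod x a = 1)
      (fun st x a h => pvOuterStep_elems n st x a h) added _ a h with h' | ⟨x, _, hr, hm⟩
  · exact Or.inl h'
  · right
    have hb := (PySem.List.mem_pyRange_one).1 hr
    have hne : a ≠ 1 := by
      intro h1
      rw [h1, pv_mod_one] at hm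
      exact absurd hm (by omega)
    omega

theorem pvBody_inv (n : Int) (all added : List Int) (hinv : pvInv n all added) :
    pvInv n (pvBody n all added).1 (pvBody n all added).2 := by
  obtain ⟨h1, h2, h3, h4, h5⟩ := hinv
  refine ⟨?_, ?_, ?_, ?_, ?_⟩
  · rw [pvBody_eq]
    exact pvFoldNodup (pvOuterStep n) (pvOuterStep_nodup n) added _ h1
  · rw [pvBody_eq]
    exact pvFoldMono1 (pvOuterStep n) (pvOuterStep_mono1 n) added _ n h2
  · intro a ha
    rcases pvBody_elems n all added a ha with h' | h'
    · exact h3 a h'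
    · exact Or.inr h'
  · rw [pvBody_eq]
    exact pvFoldSub21 (pvOuterStep n) (pvOuterStep_sub21 n) added _ (by simp [PySem.Set.empty])
  · intro k hk2 hkn hk1 hknot
    by_cases hall : k + 1 ∈ all
    · by_cases hadd : k + 1 ∈ added
      · -- k+1 is being processed this pass: i = k is tried with (k+1) % k == 1
        have hxn : k + 1 ≤ n := by
          rcases h3 (k + 1) hall with h' | h' <;> omega
        have hrange : k ∈ PySem.List.pyRange 1 (min n (k + 1)) 1 := by
          rw [PySem.List.mem_pyRange_one]
          omega
        rw [pvBody_eq]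
        exact pvFoldHit (pvOuterStep n) (pvOuterStep_mono1 n) k added _ (k + 1) hadd
          (fun st' => pvOuterStep_hit n st' (k + 1) k hrange (pv_mod_succ k hk2))
      · -- k+1 was already there and not just added: old invariant, then monotonicity
        have hk : k ∈ all := h5 k hk2 hkn hall hadd
        rw [pvBody_eq]
        exact pvFoldMono1 (pvOuterStep n) (pvOuterStep_mono1 n) added _ k hk
    · -- k+1 is new this pass, so it would be in new_numbers, contradicting hknot
      exfalso
      rw [pvBody_eq] at hk1 hknot
      rcases pvFoldNewSub (pvOuterStep n) (pvOuterStep_mono2 n) (pvOuterStep_newsub n)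
          added _ (k + 1) hk1 with h' | h'
      · exact hall h'
      · exact hknot h'

-- elements added to new_numbers were not in the old all_numbers
theorem pvBody_newdisj (n : Int) (all added : List Int) (a : Int)
    (h : a ∈ (pvBody n all added).2) : a ∉ all := by
  rw [pvBody_eq] at h
  rcases pvFoldNewDisj (pvOuterStep n) (pvOuterStep_mono1 n) (pvOuterStep_newdisj n)
      added _ a h with h' | h'
  · simp [PySem.Set.empty] at h'
  · exact h'

-- size bound: a nodup list inside {n} ∪ [2, n-1] has at most n-1 elements
theorem pvLenBound (n : Int) (hn : 3 ≤ n) (all : List Int) (h1 : all.Nodup)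
    (h3 : ∀ a ∈ all, a = n ∨ (2 ≤ a ∧ a ≤ n - 1)) : (all.length : Int) ≤ n - 1 := by
  have hsub : all.toFinset ⊆ insert n (Finset.Icc 2 (n - 1)) := by
    intro a ha
    rw [List.mem_toFinset] at ha
    rcases h3 a ha with h' | h' <;> simp [Finset.mem_insert, Finset.mem_Icc] <;> omega
  have hcard := Finset.card_le_card hsub
  have hlen : all.toFinset.card = all.length := List.toFinset_card_of_nodup h1
  have hins : (insert n (Finset.Icc 2 (n - 1))).card ≤ (Finset.Icc 2 (n - 1)).card + 1 :=
    Finset.card_insert_le _ _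
  have hicc : (Finset.Icc (2:Int) (n - 1)).card = (n - 2).toNat := by
    rw [Int.card_Icc]; omega
  omega

-- progress: a non-empty new_numbers means all_numbers strictly grew
theorem pvGrowth (n : Int) (all added : List Int) (h1 : all.Nodup)
    (hne : (pvBody n all added).2 ≠ []) :
    all.length + 1 ≤ (pvBody n all added).1.length := by
  obtain ⟨a, ha⟩ := List.exists_mem_of_ne_nil _ hne
  have hnotall : a ∉ all := pvBody_newdisj n all added a ha
  have hsub : insert a all.toFinset ⊆ (pvBody n all added).1.toFinset := by
    intro b hb
    rw [List.mem_toFinset]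
    rcases Finset.mem_insert.1 hb with h' | h'
    · have hsub21 : ∀ c ∈ (pvBody n all added).2, c ∈ (pvBody n all added).1 := by
        rw [pvBody_eq]
        exact pvFoldSub21 (pvOuterStep n) (pvOuterStep_sub21 n) added _
          (by simp [PySem.Set.empty])
      rw [h']
      exact hsub21 a ha
    · rw [List.mem_toFinset] at h'
      rw [pvBody_eq]
      exact pvFoldMono1 (pvOuterStep n) (pvOuterStep_mono1 n) added _ b h'
  have hcard := Finset.card_le_card hsub
  have h2 : (insert a all.toFinset).card = all.toFinset.card + 1 :=
    Finset.card_insert_of_notMem (by rw [List.mem_toFinset]; exact hnotall)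
  have h3 : all.toFinset.card = all.length := List.toFinset_card_of_nodup h1
  have h4 : (pvBody n all added).1.toFinset.card ≤ (pvBody n all added).1.length :=
    (pvBody n all added).1.toFinset_card_le
  omega

-- when no new numbers appear, all_numbers is exactly {n} ∪ [2, n-1]
theorem pvFinalLen (n : Int) (hn : 3 ≤ n) (all : List Int) (hinv : pvInv n all []) :
    (all.length : Int) = n - 1 := by
  obtain ⟨h1, h2, h3, _, h5⟩ := hinv
  have hdown : ∀ j : Nat, ∀ k : Int, 2 ≤ k → k + j = n - 1 → k ∈ all := by
    intro j
    induction j with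
    | zero =>
      intro k hk2 hkj
      have := h5 k hk2 (by omega) (by rw [show k + 1 = n by omega]; exact h2) (by simp)
      exact this
    | succ j ih =>
      intro k hk2 hkj
      have hk1 : k + 1 ∈ all := ih (k + 1) (by omega) (by push_cast at hkj ⊢; omega)
      exact h5 k hk2 (by push_cast at hkj; omega) hk1 (by simp)
  have hext : all.toFinset = insert n (Finset.Icc 2 (n - 1)) := by
    ext a
    rw [List.mem_toFinset, Finset.mem_insert, Finset.mem_Icc]
    constructor
    · intro ha
      rcases h3 a ha with h' | h'
      · exact Or.inl h'
      · exact Or.inr ⟨h'.1, h'.2⟩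
    · rintro (rfl | ⟨ha2, han⟩)
      · exact h2
      · exact hdown (n - 1 - a).toNat a ha2 (by omega)
  have hlen : (insert n (Finset.Icc 2 (n - 1))).card = all.length := by
    rw [← hext]; exact List.toFinset_card_of_nodup h1
  have hnot : n ∉ Finset.Icc (2:Int) (n - 1) := by simp [Finset.mem_Icc]
  have hcard : (insert n (Finset.Icc 2 (n - 1))).card = (Finset.Icc (2:Int) (n - 1)).card + 1 :=
    Finset.card_insert_of_notMem hnot
  have hicc : (Finset.Icc (2:Int) (n - 1)).card = (n - 2).toNat := by
    rw [Int.card_Icc]; omega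
  omega

-- the fueled while-loop returns a set of exactly n-1 elements whenever enough fuel remains
theorem pvLoopLen (n : Int) (hn : 3 ≤ n) :
    ∀ (fuel : Nat) (all added : List Int), pvInv n all added →
      n + 1 ≤ (all.length : Int) + fuel → ((pvLoop n fuel all added).length : Int) = n - 1 := by
  intro fuel
  induction fuel with
  | zero =>
    intro all added hinv hbound
    exfalso
    have := pvLenBound n hn all hinv.1 hinv.2.2.1
    omega
  | succ fuel ih =>
    intro all added hinv hbound
    rw [pvLoop_succ]
    by_cases hemp : added.isEmpty
    · rw [if_pos hemp]
      exact pvFinalLen n hn all (by rwa [List.isEmpty_iff.1 hemp] at hinv)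
    · rw [if_neg hemp]
      have hinv' := pvBody_inv n all added hinv
      by_cases hnew : (pvBody n all added).2 = []
      · -- no new numbers: the next iteration terminates (or fuel runs out, impossible)
        cases fuel with
        | zero =>
          exfalso
          have hb := pvLenBound n hn all hinv.1 hinv.2.2.1
          omega
        | succ fuel' =>
          simp only [hnew]
          rw [pvLoop_succ, if_pos (by simp)]
          exact pvFinalLen n hn (pvBody n all added).1 (by rwa [hnew] at hinv')
      · exact ih (pvBody n all added).1 (pvBody n all added).2 hinv'
          (by have := pvGrowth n all added hinv.1 hnew; push_cast at hbound ⊢; omega)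

-- small cases: for n ≤ 1 the first pass scans an empty range and nothing is ever added
theorem pvSmall (n : Int) (hn : n ≤ 1) : distinctIntegers n = 1 := by
  unfold distinctIntegers
  have hofl : PySem.Set.ofList [n] = [n] := PySem.Set.ofList_eq_self_of_nodup [n] (by simp)
  have hrange : PySem.List.pyRange 1 n 1 = [] := PySem.List.pyRange_one_eq_nil hn
  have hbody : pvBody n [n] [n] = ([n], []) := by
    rw [pvBody_eq]
    simp [pvOuterStep, hrange, PySem.Set.empty]
  have hfuel : n.toNat + 2 = (n.toNat + 1) + 1 := by omega
  rw [hofl, hfuel]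
  show PySem.Set.len (pvLoop n (n.toNat + 1 + 1) [n] [n]) = 1
  rw [pvLoop_succ, if_neg (by simp), hbody]
  rw [pvLoop_succ, if_pos (by simp)]
  simp [PySem.Set.len]

-- ===== VERDICT (by name: the statement is the Claim_ definition above) =====
theorem distinctIntegers_spec : Claim_equal_distinctIntegers := by
  unfold Claim_equal_distinctIntegers Spec_distinctIntegers distinctIntegers_alt
  intro n _
  by_cases hn : n ≤ 1
  · rw [pvSmall n hn]
    omega
  by_cases hn2 : n = 2
  · subst hn2
    decide
  · -- n ≥ 3: the loop fills {n} ∪ [2, n-1]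
    have hn3' : 3 ≤ n := by omega
    unfold distinctIntegers
    have hofl : PySem.Set.ofList [n] = [n] := PySem.Set.ofList_eq_self_of_nodup [n] (by simp)
    have hinv : pvInv n [n] [n] := by
      refine ⟨by simp, by simp, ?_, by simp, ?_⟩
      · intro a ha
        simp at ha
        exact Or.inl ha
      · intro k hk2 hkn hk1 hknot
        simp at hk1 hknot
        exact absurd hk1 hknot
    have hlen := pvLoopLen n hn3' (n.toNat + 2) [n] [n] hinv (by simp; omega)
    rw [hofl]
    simp [PySem.Set.len] at hlen ⊢
    omega
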